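-- pv_equiv track=rewrite | github.com/Pratik-poudel1/Python | Day 18/password_checker.py | missing_chars
-- ===== SOURCE A (Python) =====
-- import string
--
-- def missing_chars(password):
--     missing_chars = []
--     if len(password) < 8:
--         missing_chars.append("At least 8 characters")
--     if not any(char.islower() for char in password):
--         missing_chars.append("Lowercase letter")
--     if not any(char.isupper() for char in password):
--         missing_chars.append("Uppercase letter")
--     if not any(char.isdigit() for char in password):
--         missing_chars.append("Digit")
--     if not any(char in string.punctuation for char in password):
--         missing_chars.append("Special character")
--     return missing_chars
-- ===== SOURCE B (Python) =====
-- import string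
--
-- _PUNCT = set(string.punctuation)
--
-- def missing_chars(password):
--     # one pass over the characters, maintaining four flags
--     has_lower = has_upper = has_digit = has_special = False
--     for ch in password:
--         has_lower = has_lower or ('a' <= ch <= 'z')
--         has_upper = has_upper or ('A' <= ch <= 'Z')
--         has_digit = has_digit or ('0' <= ch <= '9')
--         has_special = has_special or (ch in _PUNCT)
--     out = []
--     if len(password) < 8:
--         out.append("At least 8 characters")
--     if not has_lower:
--         out.append("Lowercase letter")
--     if not has_upper:
--         out.append("Uppercase letter")
--     if not has_digit:
--         out.append("Digit")
--     if not has_special: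
--         out.append("Special character")
--     return out
-- ===== Notes on version B (the rewrite author's own statement) =====
-- stated objective: alternative
-- what changed: B replaces A's four separate any(...) scans of the password (plus list appends via not-any) with a single pass that maintains four boolean flags and builds the result list from the flags afterwards.
import Mathlib
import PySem

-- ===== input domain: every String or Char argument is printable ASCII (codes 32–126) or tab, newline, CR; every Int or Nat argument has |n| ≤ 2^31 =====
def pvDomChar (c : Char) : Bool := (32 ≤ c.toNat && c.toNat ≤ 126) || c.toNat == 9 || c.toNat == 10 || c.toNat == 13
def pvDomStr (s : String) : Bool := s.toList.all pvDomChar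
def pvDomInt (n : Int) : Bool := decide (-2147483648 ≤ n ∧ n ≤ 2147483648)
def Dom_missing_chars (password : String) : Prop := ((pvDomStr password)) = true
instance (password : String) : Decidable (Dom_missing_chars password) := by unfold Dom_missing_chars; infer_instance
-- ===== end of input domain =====

-- B replaces A's four separate any(...) scans with a single pass keeping four flags; same cost class, different structure.

-- ===== PORT A =====
-- string.punctuation, exact (ASCII)
def pyPunctuation : List Char := "!\"#$%&'()*+,-./:;<=>?@[\\]^_`{|}~".toList

def missing_chars (password : String) : List String :=
  let mc : List String := []
  let mc := if password.toList.length < 8 then mc ++ ["At least 8 characters"] else mc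
  let mc := if !(password.toList.any PySem.Chars.islower) then mc ++ ["Lowercase letter"] else mc
  let mc := if !(password.toList.any PySem.Chars.isupper) then mc ++ ["Uppercase letter"] else mc
  let mc := if !(password.toList.any PySem.Chars.isdigit) then mc ++ ["Digit"] else mc
  let mc := if !(password.toList.any (fun c => pyPunctuation.contains c)) then mc ++ ["Special character"] else mc
  mc

-- ===== PORT B =====
def missing_chars_alt (password : String) : List String :=
  let flags := password.toList.foldl
    (fun (s : Bool × Bool × Bool × Bool) ch =>
      (s.1 || ('a' ≤ ch && ch ≤ 'z'),
       s.2.1 || ('A' ≤ ch && ch ≤ 'Z'),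
       s.2.2.1 || ('0' ≤ ch && ch ≤ '9'),
       s.2.2.2 || pyPunctuation.contains ch))
    (false, false, false, false)
  (if password.toList.length < 8 then ["At least 8 characters"] else []) ++
  (if !flags.1 then ["Lowercase letter"] else []) ++
  (if !flags.2.1 then ["Uppercase letter"] else []) ++
  (if !flags.2.2.1 then ["Digit"] else []) ++
  (if !flags.2.2.2 then ["Special character"] else [])

-- ===== PRECONDITION & SPEC =====
def Spec_missing_chars (password : String) (out : List String) : Prop := out = missing_chars_alt password
instance (password : String) (out : List String) : Decidable (Spec_missing_chars password out) := by unfold Spec_missing_chars; infer_instance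

-- ===== CLAIM (what is proved, stated in full; the proofs are below) =====
def Claim_equal_missing_chars : Prop := ∀ (password : String), Dom_missing_chars password → Spec_missing_chars password (missing_chars password)

-- ===== LEMMAS AND PROOFS =====
theorem foldl_flags (l : List Char) (a b c d : Bool) :
    l.foldl
      (fun (s : Bool × Bool × Bool × Bool) ch =>
        (s.1 || ('a' ≤ ch && ch ≤ 'z'),
         s.2.1 || ('A' ≤ ch && ch ≤ 'Z'),
         s.2.2.1 || ('0' ≤ ch && ch ≤ '9'),
         s.2.2.2 || pyPunctuation.contains ch)) (a, b, c, d) =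
      (a || l.any (fun ch => 'a' ≤ ch && ch ≤ 'z'),
       b || l.any (fun ch => 'A' ≤ ch && ch ≤ 'Z'),
       c || l.any (fun ch => '0' ≤ ch && ch ≤ '9'),
       d || l.any (fun ch => pyPunctuation.contains ch)) := by
  induction l generalizing a b c d with
  | nil => simp
  | cons x xs ih => rw [List.foldl_cons, ih]; simp [List.any_cons, Bool.or_assoc]

theorem islower_eq : PySem.Chars.islower = (fun c => 'a' ≤ c && c ≤ 'z') := by
  funext c; simp only [PySem.Chars.islower, Char.le_def]

theorem isupper_eq : PySem.Chars.isupper = (fun c => 'A' ≤ c && c ≤ 'Z') := by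
  funext c; simp only [PySem.Chars.isupper, Char.le_def]

theorem isdigit_eq : PySem.Chars.isdigit = (fun c => '0' ≤ c && c ≤ '9') := by
  funext c; simp only [PySem.Chars.isdigit, Char.le_def]

-- ===== VERDICT (by name: the statement is the Claim_ definition above) =====
theorem missing_chars_spec : Claim_equal_missing_chars := by
  intro password _
  unfold Spec_missing_chars missing_chars missing_chars_alt
  rw [foldl_flags, islower_eq, isupper_eq, isdigit_eq]
  simp only [Bool.false_or]
  generalize (password.toList.any fun ch => 'a' ≤ ch && ch ≤ 'z') = b2
  generalize (password.toList.any fun ch => 'A' ≤ ch && ch ≤ 'Z') = b3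
  generalize (password.toList.any fun ch => '0' ≤ ch && ch ≤ '9') = b4
  generalize (password.toList.any fun ch => pyPunctuation.contains ch) = b5
  by_cases h1 : password.toList.length < 8 <;>
    cases b2 <;> cases b3 <;> cases b4 <;> cases b5 <;> simp [h1]
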